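-- pv_equiv track=rewrite | github.com/AnandVetcha/excel-to-ppt-explainer | auto_generate_ppt_xlwings_final_v2.py | parse_structured_columns
-- ===== SOURCE A (Python) =====
-- def parse_structured_columns(formula, table_name):
--     if not formula:
--         return []
--     cols, target, s, i = [], f"{table_name}[", formula, 0
--     while True:
--         start = s.find(target, i)
--         if start == -1:
--             break
--         j = start + len(target)
--         buf = []
--         while j < len(s):
--             ch = s[j]
--             if ch == ']':
--                 if j + 1 < len(s) and s[j+1] == ']':
--                     buf.append(']'); j += 2; continue
--                 else:
--                     j += 1; break
--             else:
--                 buf.append(ch); j += 1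
--         name = ''.join(buf).replace("'", "")
--         if name not in cols:
--             cols.append(name)
--         i = j
--     return cols
-- ===== SOURCE B (Python) =====
-- def parse_structured_columns(formula, table_name):
--     # staged passes: partition off each "table[" reference, split its tail on ']',
--     # and rejoin pieces -- an empty piece marks an escaped ']]' -- no char-level scan
--     target = table_name + "["
--     cols = []
--     rest = formula
--     while True:
--         _, sep, tail = rest.partition(target)
--         if not sep:
--             return cols
--         pieces = tail.split(']')
--         parts = [pieces[0]]
--         k = 0
--         while k + 2 < len(pieces) and pieces[k + 1] == '':
--             parts.append(pieces[k + 2])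
--             k += 2
--         name = ']'.join(parts).replace("'", "")
--         if name not in cols:
--             cols.append(name)
--         rest = ']'.join(pieces[k + 1:])
-- ===== Notes on version B (the rewrite author's own statement) =====
-- stated objective: alternative
-- what changed: Replaced A's character-by-character scanner (find-with-restart plus an inner escape-handling state machine over single chars) with staged string-level passes: partition off each 'table[' reference, split its tail on ']' and rejoin the pieces, recovering escaped ']]' from the empty pieces the split produces.
import Mathlib
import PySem

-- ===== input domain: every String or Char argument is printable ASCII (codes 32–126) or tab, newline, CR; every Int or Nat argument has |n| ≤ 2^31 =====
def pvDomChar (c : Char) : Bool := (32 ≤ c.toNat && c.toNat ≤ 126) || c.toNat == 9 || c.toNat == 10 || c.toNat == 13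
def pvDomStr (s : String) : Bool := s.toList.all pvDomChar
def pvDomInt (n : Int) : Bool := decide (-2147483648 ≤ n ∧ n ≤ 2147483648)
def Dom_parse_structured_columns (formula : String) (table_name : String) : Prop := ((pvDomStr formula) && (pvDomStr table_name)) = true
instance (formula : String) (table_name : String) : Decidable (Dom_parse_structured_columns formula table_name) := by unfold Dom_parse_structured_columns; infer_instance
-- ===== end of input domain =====

-- B replaces A's character-by-character scanner (find + inner escape-handling state machine)
-- with staged passes: partition off each "table[" reference, split its tail on ']' and
-- rejoin the pieces (an empty piece marks an escaped ']]'); objective: alternative algorithm.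

-- ===== PORT A =====
-- A's inner "while j < len(s)" loop, run on the suffix of s starting at index j:
-- returns (buf, suffix after the reference).
def pvInnerA : List Char → List Char × List Char
  | [] => ([], [])
  | ch :: rest =>
    if ch = ']' then
      match rest with
      | ']' :: rest2 => (']' :: (pvInnerA rest2).1, (pvInnerA rest2).2)
      | _ => ([], rest)
    else (ch :: (pvInnerA rest).1, (pvInnerA rest).2)

-- s.find(target, i), transliterated on the suffix of s starting at index i:
-- returns the suffix at the first occurrence (none = -1).
def pvFindA (t : List Char) : List Char → Option (List Char)
  | [] => if t.isPrefixOf ([] : List Char) then some [] else none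
  | c :: rest => if t.isPrefixOf (c :: rest) then some (c :: rest) else pvFindA t rest

-- (termination facts for pvLoopA, cited in its decreasing_by)
theorem pvFindA_some (t : List Char) : ∀ (s s' : List Char), pvFindA t s = some s' →
    s'.length ≤ s.length ∧ t.isPrefixOf s' = true := by
  intro s
  induction s with
  | nil =>
    intro s' h
    simp only [pvFindA] at h
    split at h <;> simp_all
  | cons c rest ih =>
    intro s' h
    simp only [pvFindA] at h
    split at h
    · cases h; simp_all
    · have := ih s' h
      exact ⟨le_trans this.1 (by simp), this.2⟩

theorem pvInnerA_snd_length_le : ∀ (l : List Char), (pvInnerA l).2.length ≤ l.length := by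
  intro l
  induction l using pvInnerA.induct with
  | case1 => simp [pvInnerA]
  | case2 rest2 ih => simp [pvInnerA]; omega
  | case3 rest h =>
    match rest, h with
    | [], _ => simp [pvInnerA]
    | c2 :: r2, h =>
      simp [pvInnerA]
  | case4 ch rest h ih =>
    rw [pvInnerA.eq_def]
    simp [h]
    exact Nat.le_succ_of_le ih

-- A's "while True" loop; tn = table_name's characters, s = the suffix of the formula at index i.
def pvLoopA (tn : List Char) (s : List Char) (cols : List String) : List String :=
  match hf : pvFindA (tn ++ ['[']) s with
  | none => cols
  | some s' =>
    let after := s'.drop (tn ++ ['[']).length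
    let p := pvInnerA after
    let name := String.ofList (PySem.Chars.replace p.1 ['\''] [])
    let cols' := if name ∈ cols then cols else cols ++ [name]
    pvLoopA tn p.2 cols'
termination_by s.length
decreasing_by
  have h := pvFindA_some _ _ _ hf
  have h2 : 1 ≤ s'.length := by
    have := List.IsPrefix.length_le (List.isPrefixOf_iff_prefix.mp h.2)
    simp at this; omega
  have h3 := pvInnerA_snd_length_le (s'.drop (tn ++ ['[']).length)
  simp only [List.length_drop] at h3
  simp at h3 ⊢
  omega

def parse_structured_columns (formula : String) (table_name : String) : List String :=
  if formula = "" then []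
  else pvLoopA table_name.toList formula.toList []

-- ===== PORT B =====
-- rest.partition(target), ported by hand (no PySem primitive): exact — returns the text
-- before the FIRST occurrence, the separator (empty if absent, like Python), and the tail.
def pvPartition (t : List Char) : List Char → List Char × List Char × List Char
  | [] => if t.isPrefixOf ([] : List Char) then ([], t, []) else ([], [], [])
  | c :: r =>
    if t.isPrefixOf (c :: r) then ([], t, (c :: r).drop t.length)
    else
      let p := pvPartition t r
      (c :: p.1, p.2.1, p.2.2)

-- B's "while k + 2 < len(pieces) …" walk over the split pieces: collects parts (the
-- name chunks, escapes marked by empty pieces) and returns the remaining pieces.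
def pvParts : List (List Char) → List (List Char) × List (List Char)
  | p0 :: [] :: p2 :: rest =>
    let pr := pvParts (p2 :: rest)
    (p0 :: pr.1, pr.2)
  | p0 :: rest => ([p0], rest)
  | [] => ([], [])    -- unreachable: str.split never returns an empty list

-- (termination facts for pvLoopB, cited in its decreasing_by)
-- reference recursion for PySem.Chars.splitOn s [']']
def pvMySplit : List Char → List (List Char)
  | [] => [[]]
  | c :: r =>
    if c = ']' then [] :: pvMySplit r
    else
      match pvMySplit r with
      | [] => [[c]]
      | p :: ps => (c :: p) :: ps

theorem pvMySplit_cons : ∀ (l : List Char), ∃ p ps, pvMySplit l = p :: ps := by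
  intro l
  cases l with
  | nil => exact ⟨[], [], rfl⟩
  | cons c r =>
    simp only [pvMySplit]
    split
    · exact ⟨_, _, rfl⟩
    · rcases h : pvMySplit r with _ | ⟨p, ps⟩ <;> exact ⟨_, _, rfl⟩

def pvConsH (pre : List Char) : List (List Char) → List (List Char)
  | [] => [pre]
  | p :: ps => (pre ++ p) :: ps

theorem pv_go_eq : ∀ (fuel : Nat) (l cur : List Char) (acc : List (List Char)), l.length < fuel →
    PySem.Chars.splitOn.go [']'] fuel l cur acc = acc.reverse ++ pvConsH cur.reverse (pvMySplit l) := by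
  intro fuel
  induction fuel with
  | zero => intro l cur acc h; omega
  | succ f ih =>
    intro l cur acc h
    cases l with
    | nil =>
      rw [PySem.Chars.splitOn.go]
      · simp [pvMySplit, pvConsH]
      · omega
    | cons c r =>
      rw [PySem.Chars.splitOn.go]
      by_cases hc : c = ']'
      · subst hc
        have hp : ([']'] : List Char).isPrefixOf (']' :: r) = true := by simp [List.isPrefixOf]
        rw [if_pos hp]
        simp only [List.length_cons, List.length_nil, List.drop_succ_cons, List.drop_zero]
        rw [ih r [] (cur.reverse :: acc) (by simp at h ⊢; omega)]
        simp [pvMySplit, pvConsH]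
        obtain ⟨p, ps, hps⟩ := pvMySplit_cons r
        simp [hps, pvConsH]
      · have hp : ([']'] : List Char).isPrefixOf (c :: r) = false := by
          simp [List.isPrefixOf, hc]
          intro hcc; exact absurd hcc.symm hc
        rw [if_neg (by simp [hp])]
        rw [ih r (c :: cur) acc (by simp at h ⊢; omega)]
        simp only [pvMySplit, if_neg hc]
        obtain ⟨p, ps, hps⟩ := pvMySplit_cons r
        simp [hps, pvConsH]

theorem pv_splitOn_eq (s : List Char) : PySem.Chars.splitOn s [']'] = pvMySplit s := by
  unfold PySem.Chars.splitOn
  rw [pv_go_eq (s.length + 1) s [] [] (by omega)]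
  obtain ⟨p, ps, hps⟩ := pvMySplit_cons s
  simp [hps, pvConsH]

theorem pv_join_head (c : Char) (p : List Char) (ps : List (List Char)) :
    PySem.Chars.join [']'] ((c :: p) :: ps) = c :: PySem.Chars.join [']'] (p :: ps) := by
  cases ps with
  | nil => simp [PySem.Chars.join_singleton]
  | cons q qs => simp [PySem.Chars.join_cons_cons]

theorem pv_join_cons_nil (p : List Char) (ps : List (List Char)) :
    PySem.Chars.join [']'] (([] : List Char) :: p :: ps) = ']' :: PySem.Chars.join [']'] (p :: ps) := by
  simp [PySem.Chars.join_cons_cons]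

-- the length of a join only shrinks when pieces are dropped from the front
theorem pv_join_le (p : List Char) (qs : List (List Char)) :
    (PySem.Chars.join [']'] qs).length ≤ (PySem.Chars.join [']'] (p :: qs)).length := by
  cases qs with
  | nil => simp [PySem.Chars.join_nil, PySem.Chars.join_singleton]
  | cons q rest => simp [PySem.Chars.join_cons_cons]; omega

theorem pv_join_le_of_suffix (r ps : List (List Char)) (h : r <:+ ps) :
    (PySem.Chars.join [']'] r).length ≤ (PySem.Chars.join [']'] ps).length := by
  obtain ⟨pre, rfl⟩ := h
  induction pre with
  | nil => simp
  | cons x xs ih => exact le_trans ih (pv_join_le x (xs ++ r))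

theorem pvParts_snd_suffix : ∀ (ps : List (List Char)), (pvParts ps).2 <:+ ps := by
  intro ps
  induction ps using pvParts.induct with
  | case1 p0 p2 rest ih =>
    simp only [pvParts]
    exact (ih.trans (List.suffix_cons _ _)).trans (List.suffix_cons _ _)
  | case2 p0 rest h =>
    rw [pvParts.eq_def]
    split
    · rename_i heq
      injection heq with h1 h2
      exact absurd h2 (fun hh => h _ _ hh)
    · rename_i p0' rest' heq
      injection heq with h1 h2
      subst h1; subst h2
      exact List.suffix_cons _ _
    · rename_i heq; cases heq
  | case3 => simp [pvParts]

theorem pv_join_mySplit : ∀ (s : List Char), PySem.Chars.join [']'] (pvMySplit s) = s := by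
  intro s
  induction s with
  | nil => simp [pvMySplit, PySem.Chars.join, List.intercalate]
  | cons c r ih =>
    by_cases hc : c = ']'
    · subst hc
      rw [show pvMySplit (']' :: r) = [] :: pvMySplit r from by simp [pvMySplit]]
      obtain ⟨p, ps, hps⟩ := pvMySplit_cons r
      rw [hps] at ih ⊢
      rw [pv_join_cons_nil, ih]
    · simp only [pvMySplit, if_neg hc]
      obtain ⟨p, ps, hps⟩ := pvMySplit_cons r
      rw [hps] at ih ⊢
      rw [pv_join_head, ih]

theorem pvParts_snd_join_le (ps : List (List Char)) :
    (PySem.Chars.join [']'] (pvParts ps).2).length ≤ (PySem.Chars.join [']'] ps).length :=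
  pv_join_le_of_suffix _ _ (pvParts_snd_suffix ps)

theorem pvPartition_tail_lt : ∀ (t : List Char) (s : List Char), t ≠ [] →
    (pvPartition t s).2.1 ≠ [] → (pvPartition t s).2.2.length < s.length := by
  intro t s ht
  induction s with
  | nil =>
    intro h
    exfalso
    have : t.isPrefixOf ([] : List Char) = false := by
      cases t with
      | nil => exact absurd rfl ht
      | cons a b => simp [List.isPrefixOf]
    simp [pvPartition, this] at h
  | cons c r ih =>
    intro h
    by_cases hp : t.isPrefixOf (c :: r) = true
    · have h1 : 1 ≤ t.length := by
        cases t with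
        | nil => exact absurd rfl ht
        | cons a b => simp
      simp only [pvPartition, if_pos hp]
      simp
      omega
    · simp only [pvPartition, if_neg hp] at h ⊢
      have := ih h
      simp only [List.length_cons]
      omega

-- B's "while True" loop over the remaining string.
def pvLoopB (tn : List Char) (cols : List String) (rest : List Char) : List String :=
  let pt := pvPartition (tn ++ ['[']) rest
  if hne : pt.2.1 = [] then cols
  else
    let pieces := PySem.Chars.splitOn pt.2.2 [']']
    let pr := pvParts pieces
    let name := String.ofList (PySem.Chars.replace (PySem.Chars.join [']'] pr.1) ['\''] [])
    let cols' := if name ∈ cols then cols else cols ++ [name]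
    pvLoopB tn cols' (PySem.Chars.join [']'] pr.2)
termination_by rest.length
decreasing_by
  have h1 := pvParts_snd_join_le (PySem.Chars.splitOn (pvPartition (tn ++ ['[']) rest).2.2 [']'])
  rw [pv_splitOn_eq, pv_join_mySplit] at h1
  have h2 := pvPartition_tail_lt (tn ++ ['[']) rest (by simp) hne
  rw [pv_splitOn_eq]
  omega

def parse_structured_columns_alt (formula : String) (table_name : String) : List String :=
  pvLoopB table_name.toList [] formula.toList

-- ===== PRECONDITION & SPEC =====
def Spec_parse_structured_columns (formula : String) (table_name : String) (out : List String) : Prop := out = parse_structured_columns_alt formula table_name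
instance (formula : String) (table_name : String) (out : List String) : Decidable (Spec_parse_structured_columns formula table_name out) := by unfold Spec_parse_structured_columns; infer_instance

-- ===== CLAIM (what is proved, stated in full; the proofs are below) =====
def Claim_equal_parse_structured_columns : Prop := ∀ (formula : String) (table_name : String), Dom_parse_structured_columns formula table_name → Spec_parse_structured_columns formula table_name (parse_structured_columns formula table_name)

-- ===== LEMMAS AND PROOFS =====

-- the head piece only prepends itself: pvParts (p :: ps) = (p :: l, r) with l, r independent of p
theorem pvParts_eq_cons : ∀ (ps : List (List Char)), ∃ l r,
    ∀ (q : List Char), pvParts (q :: ps) = (q :: l, r) := by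
  intro ps
  match ps with
  | [] :: p2 :: rest => exact ⟨(pvParts (p2 :: rest)).1, (pvParts (p2 :: rest)).2, fun q => by simp [pvParts]⟩
  | [] => exact ⟨[], [], fun q => by simp [pvParts]⟩
  | [[]] => exact ⟨[], [[]], fun q => by simp [pvParts]⟩
  | (c :: p) :: rest => exact ⟨[], (c :: p) :: rest, fun q => by simp [pvParts]⟩

-- A's inner scan, recovered from B's split/walk/rejoin passes
theorem pvInnerA_eq_parts : ∀ (tail : List Char),
    pvInnerA tail = (PySem.Chars.join [']'] (pvParts (pvMySplit tail)).1,
                     PySem.Chars.join [']'] (pvParts (pvMySplit tail)).2) := by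
  intro tail
  induction tail using pvInnerA.induct with
  | case1 => simp [pvInnerA, pvMySplit, pvParts, PySem.Chars.join, List.intercalate]
  | case2 rest2 ih =>
    obtain ⟨p, ps, hps⟩ := pvMySplit_cons rest2
    have hsplit : pvMySplit (']' :: ']' :: rest2) = [] :: [] :: p :: ps := by
      simp [pvMySplit, hps]
    rw [hsplit]
    have hparts : pvParts ([] :: [] :: p :: ps) = ([] :: (pvParts (p :: ps)).1, (pvParts (p :: ps)).2) := by
      simp [pvParts]
    rw [hparts]
    rw [hps] at ih
    obtain ⟨l, r, hl⟩ := pvParts_eq_cons ps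
    rw [hl p] at ih ⊢
    rw [pv_join_cons_nil]
    simp [pvInnerA, ih]
  | case3 rest h =>
    match rest, h with
    | [], _ =>
      simp [pvInnerA, pvMySplit, pvParts, PySem.Chars.join, List.intercalate]
    | c2 :: r2, h =>
      have hc2 : c2 ≠ ']' := by
        intro hc; exact h r2 (by rw [hc])
      obtain ⟨p, ps, hps⟩ := pvMySplit_cons r2
      have hsplit : pvMySplit (']' :: c2 :: r2) = [] :: (c2 :: p) :: ps := by
        simp [pvMySplit, hc2, hps]
      rw [hsplit]
      have hparts : pvParts ([[], c2 :: p] ++ ps) = ([[]], (c2 :: p) :: ps) := by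
        cases ps <;> simp [pvParts]
      simp only [List.cons_append, List.nil_append] at hparts
      rw [hparts]
      have hj : PySem.Chars.join [']'] ((c2 :: p) :: ps) = c2 :: r2 := by
        rw [show ((c2 :: p) :: ps) = pvMySplit (c2 :: r2) by simp [pvMySplit, hc2, hps]]
        exact pv_join_mySplit _
      simp [pvInnerA, hj, PySem.Chars.join_singleton]
  | case4 ch rest h ih =>
    obtain ⟨p, ps, hps⟩ := pvMySplit_cons rest
    have hsplit : pvMySplit (ch :: rest) = (ch :: p) :: ps := by
      simp [pvMySplit, h, hps]
    rw [hsplit]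
    obtain ⟨l, r, hl⟩ := pvParts_eq_cons ps
    rw [hl (ch :: p)]
    rw [hps, hl p] at ih
    rw [pv_join_head]
    rw [pvInnerA.eq_def]
    simp [h, ih]

theorem pvPartition_of_find_none (t : List Char) (ht : t ≠ []) :
    ∀ (s : List Char), pvFindA t s = none → (pvPartition t s).2.1 = [] := by
  intro s
  induction s with
  | nil =>
    intro hf
    have : t.isPrefixOf ([] : List Char) = false := by
      cases t with
      | nil => exact absurd rfl ht
      | cons a b => simp [List.isPrefixOf]
    simp [pvPartition, this]
  | cons c r ih =>
    intro hf
    simp only [pvFindA] at hf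
    split at hf
    · cases hf
    · rename_i hp
      simp only [pvPartition, if_neg hp]
      exact ih hf

theorem pvPartition_of_find_some (t : List Char) :
    ∀ (s s' : List Char), pvFindA t s = some s' →
    (pvPartition t s).2.1 = t ∧ (pvPartition t s).2.2 = s'.drop t.length := by
  intro s
  induction s with
  | nil =>
    intro s' hf
    simp only [pvFindA] at hf
    split at hf
    · rename_i hp
      cases hf
      have : t = [] := by
        cases t with
        | nil => rfl
        | cons a b => simp [List.isPrefixOf] at hp
      subst this
      simp [pvPartition, List.isPrefixOf]
    · cases hf
  | cons c r ih =>
    intro s' hf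
    simp only [pvFindA] at hf
    split at hf
    · rename_i hp
      cases hf
      simp [pvPartition, hp]
    · rename_i hp
      simp only [pvPartition, if_neg hp]
      exact ih s' hf

theorem pvLoop_eq (tn : List Char) : ∀ (n : Nat) (s : List Char), s.length ≤ n →
    ∀ (cols : List String), pvLoopA tn s cols = pvLoopB tn cols s := by
  have ht : tn ++ ['['] ≠ [] := by simp
  have hnone : ∀ (s : List Char) (cols : List String),
      pvFindA (tn ++ ['[']) s = none → pvLoopA tn s cols = pvLoopB tn cols s := by
    intro s cols hf
    rw [pvLoopA.eq_def, pvLoopB.eq_def]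
    have hp := pvPartition_of_find_none _ ht s hf
    split
    · simp [hp]
    · rename_i s' heq
      rw [heq] at hf; cases hf
  intro n
  induction n with
  | zero =>
    intro s hs cols
    have hse : s = [] := List.eq_nil_of_length_eq_zero (Nat.le_zero.mp hs)
    subst hse
    apply hnone
    have : (tn ++ ['[']).isPrefixOf ([] : List Char) = false := by
      cases h : tn ++ ['['] with
      | nil => simp at h
      | cons a b => simp [List.isPrefixOf]
    simp [pvFindA, this]
  | succ n ih =>
    intro s hs cols
    match hf : pvFindA (tn ++ ['[']) s with
    | none => exact hnone s cols hf
    | some s' =>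
      obtain ⟨hsep, htail⟩ := pvPartition_of_find_some (tn ++ ['[']) s s' hf
      have hlen : (pvInnerA (s'.drop (tn ++ ['[']).length)).2.length ≤ n := by
        have h1 := pvInnerA_snd_length_le (s'.drop (tn ++ ['[']).length)
        have h2 := pvFindA_some _ _ _ hf
        have h3 : 1 ≤ s'.length := by
          have := List.IsPrefix.length_le (List.isPrefixOf_iff_prefix.mp h2.2)
          simp at this; omega
        simp only [List.length_drop] at h1
        have h4 := h2.1
        simp at h1 ⊢
        omega
      have hA1 : PySem.Chars.join [']'] (pvParts (pvMySplit (s'.drop (tn ++ ['[']).length))).1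
          = (pvInnerA (s'.drop (tn ++ ['[']).length)).1 := by
        rw [pvInnerA_eq_parts]
      have hA2 : PySem.Chars.join [']'] (pvParts (pvMySplit (s'.drop (tn ++ ['[']).length))).2
          = (pvInnerA (s'.drop (tn ++ ['[']).length)).2 := by
        rw [pvInnerA_eq_parts]
      rw [pvLoopA.eq_def]
      split
      · rename_i heq
        rw [heq] at hf; cases hf
      · rename_i s'' heq
        rw [heq] at hf
        injection hf with hf'
        subst hf'
        rw [pvLoopB.eq_def]
        simp only [hsep, htail, pv_splitOn_eq, dif_neg ht, hA1, hA2]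
        exact ih _ hlen _

theorem main_eq (formula table_name : String) :
    parse_structured_columns formula table_name = parse_structured_columns_alt formula table_name := by
  unfold parse_structured_columns parse_structured_columns_alt
  by_cases hf : formula = ""
  · subst hf
    rw [pvLoopB.eq_def]
    have : (pvPartition (table_name.toList ++ ['[']) []).2.1 = [] := by
      have : (table_name.toList ++ ['[']).isPrefixOf ([] : List Char) = false := by
        cases h : table_name.toList ++ ['['] with
        | nil => simp at h
        | cons a b => simp [List.isPrefixOf]
      simp [pvPartition, this]
    simp [this]
  · rw [if_neg hf]
    exact pvLoop_eq _ formula.toList.length formula.toList le_rfl []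

-- ===== VERDICT (by name: the statement is the Claim_ definition above) =====
theorem parse_structured_columns_spec : Claim_equal_parse_structured_columns := by
  intro formula table_name _
  unfold Spec_parse_structured_columns
  exact main_eq formula table_name
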